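-- pv_equiv track=rewrite | github.com/simuzin/Online_Judge | 프로그래머스/0/120864. 숨어있는 숫자의 덧셈 （2）/숨어있는 숫자의 덧셈 （2）.py | solution
-- ===== SOURCE A (Python) =====
-- def solution(my_string):
--     answer = 0
--     stack = []
--     for i in my_string:
--         if i.isdigit():
--             stack.append(i)
--         else:
--             if stack:
--                 temp = ''.join(str(i) for i in stack)
--                 answer += int(temp)
--                 stack = []
--     if stack:
--         temp = ''.join(str(i) for i in stack)
--         answer += int(temp)
--     return answer
-- ===== SOURCE B (Python) =====
-- from itertools import groupby
--
--
-- def solution(my_string):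
--     return sum(int(''.join(g)) for k, g in groupby(my_string, key=str.isdigit) if k)
-- ===== Notes on version B (the rewrite author's own statement) =====
-- stated objective: idiomatic
-- what changed: Replaces the manual stack-append-and-flush loop with itertools.groupby(key=str.isdigit): contiguous digit runs come out of one grouping pass and are summed directly.
import Mathlib
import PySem

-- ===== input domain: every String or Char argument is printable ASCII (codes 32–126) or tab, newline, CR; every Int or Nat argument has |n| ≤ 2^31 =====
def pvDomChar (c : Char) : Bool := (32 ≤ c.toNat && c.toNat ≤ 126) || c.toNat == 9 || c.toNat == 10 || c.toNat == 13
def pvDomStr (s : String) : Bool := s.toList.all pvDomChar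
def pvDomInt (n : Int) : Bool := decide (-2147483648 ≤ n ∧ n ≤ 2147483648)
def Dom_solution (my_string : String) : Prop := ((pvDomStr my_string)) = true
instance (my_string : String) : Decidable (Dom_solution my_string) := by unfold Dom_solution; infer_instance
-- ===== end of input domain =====

-- B replaces A's manual stack-append-and-flush loop with a single grouping pass
-- (itertools.groupby by str.isdigit) whose digit groups are summed directly (idiomatic; same cost).


-- ===== PORT A =====
-- int(''.join(stack)): ported as (PySem.Int.ofChars? stack).getD 0. Exact on Dom: the stack
-- is always a nonempty run of ASCII digit chars there, on which ofChars? returns some.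
def solutionStep (st : Int × List Char) (i : Char) : Int × List Char :=
  if PySem.Str.isdigit i then (st.1, st.2 ++ [i])
  else if st.2 ≠ [] then (st.1 + (PySem.Int.ofChars? st.2).getD 0, [])
  else st

def solution (my_string : String) : Int :=
  let r := my_string.toList.foldl solutionStep (0, [])
  if r.2 ≠ [] then r.1 + (PySem.Int.ofChars? r.2).getD 0 else r.1

-- ===== PORT B =====
-- hand port of itertools.groupby(cs, key=isdigit): list of (key, contiguous run) pairs
def pyGroupby (cs : List Char) : List (Bool × List Char) :=
  match cs with
  | [] => []
  | c :: rest =>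
    let k := PySem.Str.isdigit c
    (k, c :: rest.takeWhile (fun x => PySem.Str.isdigit x == k)) ::
      pyGroupby (rest.dropWhile (fun x => PySem.Str.isdigit x == k))
termination_by cs.length
decreasing_by
  simpa using Nat.lt_succ_of_le (List.length_dropWhile_le _ _)

-- sum(int(''.join(g)) for k, g in groupby(my_string, key=str.isdigit) if k)
def solution_alt (my_string : String) : Int :=
  (((pyGroupby my_string.toList).filter (fun g => g.1)).map
    (fun g => (PySem.Int.ofChars? g.2).getD 0)).sum

-- ===== PRECONDITION & SPEC =====
def Spec_solution (my_string : String) (out : Int) : Prop := out = solution_alt my_string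
instance (my_string : String) (out : Int) : Decidable (Spec_solution my_string out) := by unfold Spec_solution; infer_instance

-- ===== CLAIM (what is proved, stated in full; the proofs are below) =====
def Claim_equal_solution : Prop := ∀ (my_string : String), Dom_solution my_string → Spec_solution my_string (solution my_string)

-- ===== LEMMAS AND PROOFS =====

-- the value A's loop will still add when it reaches the end of cs with `stack` pending
def pendG (stack : List Char) (cs : List Char) : Int :=
  match cs with
  | [] => if stack ≠ [] then (PySem.Int.ofChars? stack).getD 0 else 0
  | c :: cs =>
    if PySem.Str.isdigit c then pendG (stack ++ [c]) cs
    else (if stack ≠ [] then (PySem.Int.ofChars? stack).getD 0 else 0) + pendG [] cs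

theorem foldl_step_pendG (cs : List Char) (ans : Int) (stack : List Char) :
    (let r := cs.foldl solutionStep (ans, stack)
     if r.2 ≠ [] then r.1 + (PySem.Int.ofChars? r.2).getD 0 else r.1) = ans + pendG stack cs := by
  induction cs generalizing ans stack with
  | nil =>
    simp only [List.foldl_nil, pendG]
    by_cases h : stack = [] <;> simp [h]
  | cons c cs ih =>
    simp only [List.foldl_cons, pendG, solutionStep]
    by_cases hd : PySem.Str.isdigit c
    · simp [hd, ih]
    · by_cases hs : stack = []
      · simp [hd, hs, ih]
      · simp [hd, hs, ih]; ring

theorem pendG_run (cs : List Char) (stack : List Char) (hs : stack ≠ []) :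
    pendG stack cs =
      (PySem.Int.ofChars? (stack ++ cs.takeWhile (fun x => PySem.Str.isdigit x))).getD 0 +
        pendG [] (cs.dropWhile (fun x => PySem.Str.isdigit x)) := by
  induction cs generalizing stack with
  | nil => simp [pendG, hs]
  | cons c cs ih =>
    by_cases hd : PySem.Str.isdigit c
    · have h1 : pendG stack (c :: cs) = pendG (stack ++ [c]) cs := by simp [pendG, hd]
      rw [h1, ih (stack ++ [c]) (by simp)]
      simp [hd]
    · simp [pendG, hd, hs]

theorem pendG_drop_nondigit (cs : List Char) :
    pendG [] cs = pendG [] (cs.dropWhile (fun x => !PySem.Str.isdigit x)) := by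
  induction cs with
  | nil => rfl
  | cons c cs ih =>
    by_cases hd : PySem.Str.isdigit c
    · simp [hd]
    · simpa [pendG, List.dropWhile_cons, hd] using ih

theorem pendG_eq_groupby (cs : List Char) :
    pendG [] cs =
      (((pyGroupby cs).filter (fun g => g.1)).map
        (fun g => (PySem.Int.ofChars? g.2).getD 0)).sum := by
  induction hn : cs.length using Nat.strong_induction_on generalizing cs with
  | _ n ih =>
    match cs with
    | [] => simp [pendG, pyGroupby]
    | c :: cs =>
      rw [pyGroupby]
      by_cases hd : PySem.Str.isdigit c
      · have hp : (fun x => PySem.Str.isdigit x == PySem.Str.isdigit c)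
            = (fun x => PySem.Str.isdigit x) := by
          funext x; simp [hd]
        have h1 : pendG [] (c :: cs) = pendG [c] cs := by simp [pendG, hd]
        rw [h1, pendG_run cs [c] (by simp)]
        have hrec := ih (cs.dropWhile (fun x => PySem.Str.isdigit x)).length
          (by subst hn; exact Nat.lt_succ_of_le (List.length_dropWhile_le _ _))
          (cs.dropWhile (fun x => PySem.Str.isdigit x)) rfl
        simp only [hd, beq_true, List.filter_cons, if_pos trivial, List.map_cons, List.sum_cons]
        rw [hrec]
        simp
      · have hd' : PySem.Str.isdigit c = false := by simpa using hd
        have hp : (fun x => PySem.Str.isdigit x == false)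
            = (fun x => !PySem.Str.isdigit x) := by
          funext x; cases PySem.Str.isdigit x <;> simp
        have h1 : pendG [] (c :: cs) = pendG [] cs := by simp [pendG, hd]
        have hrec := ih (cs.dropWhile (fun x => !PySem.Str.isdigit x)).length
          (by subst hn; exact Nat.lt_succ_of_le (List.length_dropWhile_le _ _))
          (cs.dropWhile (fun x => !PySem.Str.isdigit x)) rfl
        simp only [hd', hp, List.filter_cons]
        rw [h1, pendG_drop_nondigit cs, hrec]
        simp

-- ===== VERDICT (by name: the statement is the Claim_ definition above) =====
theorem solution_spec : Claim_equal_solution := by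
  intro s _
  unfold Spec_solution solution solution_alt
  rw [foldl_step_pendG, pendG_eq_groupby]
  simp
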